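-- pv_equiv track=rewrite | github.com/Wazzaboy/Wazzaboy | hkjc-edge-system/scripts/run_validation.py | check_winners
-- ===== SOURCE A (Python) =====
-- def blank(value: object) -> bool:
--     return str(value if value is not None else "").strip() in {"", "NULL", "nan", "NaN"}
--
-- def check_winners(results: list[dict[str, str]]) -> list[str]:
--     races = {str(row.get("race_id", "")).strip() for row in results if not blank(row.get("race_id", ""))}
--     winners: dict[str, int] = {}
--     for row in results:
--         race_id = str(row.get("race_id", "")).strip()
--         finish = str(row.get("finish_position", "")).strip().upper()
--         if race_id and finish.split()[0:1] == ["1"]: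
--             winners[race_id] = winners.get(race_id, 0) + 1
--     return [f"results: race_id={race_id} winner_count=0" for race_id in sorted(races) if winners.get(race_id, 0) < 1]
-- ===== SOURCE B (Python) =====
-- def check_winners(results: list[dict[str, str]]) -> list[str]:
--     # Sort-and-group-scan: collect (race_id, is_winner_row) pairs for the valid rows,
--     # sort them by race_id, then emit one line per group that contains no winner row.
--     pairs = []
--     for row in results:
--         race_id = str(row.get("race_id", "")).strip()
--         if race_id in {"", "NULL", "nan", "NaN"}:
--             continue
--         finish = str(row.get("finish_position", "")).strip().upper()
--         pairs.append((race_id, finish.split()[0:1] == ["1"]))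
--     pairs.sort(key=lambda p: p[0])
--     out = []
--     cur = None
--     won = False
--     for race_id, w in pairs:
--         if race_id != cur:
--             if cur is not None and not won:
--                 out.append(f"results: race_id={cur} winner_count=0")
--             cur, won = race_id, w
--         else:
--             won = won or w
--     if cur is not None and not won:
--         out.append(f"results: race_id={cur} winner_count=0")
--     return out
-- ===== Notes on version B (the rewrite author's own statement) =====
-- stated objective: alternative
-- what changed: Replaces A's hash-based pipeline (a set of race ids plus a per-race counting dict filtered with .get()<1) by a sort-and-group-scan: collect (race_id, is_winner_row) pairs for valid rows, sort them by race_id, and emit one line per consecutive group containing no winner row.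
import Mathlib
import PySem

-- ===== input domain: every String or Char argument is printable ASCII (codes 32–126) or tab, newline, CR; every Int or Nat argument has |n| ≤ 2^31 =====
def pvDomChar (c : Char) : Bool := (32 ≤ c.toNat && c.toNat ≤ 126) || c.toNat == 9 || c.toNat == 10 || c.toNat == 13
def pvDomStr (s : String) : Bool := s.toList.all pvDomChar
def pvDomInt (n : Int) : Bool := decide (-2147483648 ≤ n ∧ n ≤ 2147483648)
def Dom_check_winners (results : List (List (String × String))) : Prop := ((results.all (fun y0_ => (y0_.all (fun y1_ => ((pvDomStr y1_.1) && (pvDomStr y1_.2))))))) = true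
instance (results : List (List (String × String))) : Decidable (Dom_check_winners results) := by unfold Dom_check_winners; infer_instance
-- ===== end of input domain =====

-- B replaces A's hash-based pipeline (race-id set + per-race counting dict) by a
-- sort-and-group-scan over (race_id, is_winner_row) pairs (objective: alternative).

-- ===== PORT A =====
def blank (value : String) : Bool :=
  let s := PySem.Str.strip value
  s == "" || s == "NULL" || s == "nan" || s == "NaN"

def check_winners (results : List (List (String × String))) : List String :=
  let races : PySem.Set String :=
    results.foldl (fun s row =>
      if blank ((PySem.Dict.mk row).getD "race_id" "") then s
      else PySem.Set.add s (PySem.Str.strip ((PySem.Dict.mk row).getD "race_id" ""))) PySem.Set.empty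
  let winners : PySem.Dict String Int :=
    results.foldl (fun d row =>
      let race_id := PySem.Str.strip ((PySem.Dict.mk row).getD "race_id" "")
      let finish := PySem.Str.upper (PySem.Str.strip ((PySem.Dict.mk row).getD "finish_position" ""))
      if race_id ≠ "" ∧ PySem.List.slice (PySem.Str.split₀ finish) (some 0) (some 1) = ["1"]
      then d.insert race_id (d.getD race_id 0 + 1) else d) PySem.Dict.empty
  ((PySem.List.sorted races (fun x => x) false).filter
      (fun race_id => decide (winners.getD race_id 0 < 1))).map
    (fun race_id => "results: race_id=" ++ race_id ++ " winner_count=0")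

-- ===== PORT B =====
-- the for-loop over the sorted pairs with its (cur, won) state; the two `none` cases
-- are the loop's start, the two `[]` cases the flush after the loop
def pvScan : Option (String × Bool) → List (String × Bool) → List String
  | none, [] => []
  | some (rid, won), [] =>
      if won then [] else ["results: race_id=" ++ rid ++ " winner_count=0"]
  | none, (r, w) :: rest => pvScan (some (r, w)) rest
  | some (rid, won), (r, w) :: rest =>
      if r == rid then pvScan (some (rid, won || w)) rest
      else (if won then [] else ["results: race_id=" ++ rid ++ " winner_count=0"]) ++
        pvScan (some (r, w)) rest

def check_winners_alt (results : List (List (String × String))) : List String :=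
  let pairs : List (String × Bool) :=
    results.foldl (fun acc row =>
      let race_id := PySem.Str.strip ((PySem.Dict.mk row).getD "race_id" "")
      if race_id == "" || race_id == "NULL" || race_id == "nan" || race_id == "NaN" then acc
      else
        let finish := PySem.Str.upper (PySem.Str.strip ((PySem.Dict.mk row).getD "finish_position" ""))
        acc ++ [(race_id, PySem.List.slice (PySem.Str.split₀ finish) (some 0) (some 1) == ["1"])]) []
  pvScan none (PySem.List.sorted pairs (fun p => p.1) false)

-- ===== PRECONDITION & SPEC =====
def Spec_check_winners (results : List (List (String × String))) (out : List String) : Prop := out = check_winners_alt results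
instance (results : List (List (String × String))) (out : List String) : Decidable (Spec_check_winners results out) := by unfold Spec_check_winners; infer_instance

-- ===== CLAIM (what is proved, stated in full; the proofs are below) =====
def Claim_equal_check_winners : Prop := ∀ (results : List (List (String × String))), Dom_check_winners results → Spec_check_winners results (check_winners results)

-- ===== LEMMAS AND PROOFS =====

-- abbreviations used only by the proofs
def pvKey (row : List (String × String)) : String :=
  PySem.Str.strip ((PySem.Dict.mk row).getD "race_id" "")
def pvFlag (row : List (String × String)) : Bool :=
  PySem.List.slice (PySem.Str.split₀ (PySem.Str.upper (PySem.Str.strip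
    ((PySem.Dict.mk row).getD "finish_position" "")))) (some 0) (some 1) == ["1"]
def pvFmt (rid : String) : String := "results: race_id=" ++ rid ++ " winner_count=0"

-- a 'skip-or-add' set-building loop is set(comprehension): ofList of the filtered, mapped list
theorem pv_foldl_skip_add {α β : Type} [BEq α] (l : List β) (c : β → Bool) (k : β → α) :
    l.foldl (fun s row => if c row then s else PySem.Set.add s (k row)) PySem.Set.empty
      = PySem.Set.ofList ((l.filter (fun row => !c row)).map k) := by
  have h : ∀ (s : PySem.Set α) (row : β),
      (if c row then s else PySem.Set.add s (k row)) = (if !c row then PySem.Set.add s (k row) else s) := by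
    intro s row; cases hc : c row <;> simp
  calc l.foldl (fun s row => if c row then s else PySem.Set.add s (k row)) PySem.Set.empty
      = l.foldl (fun s row => if !c row then PySem.Set.add s (k row) else s) PySem.Set.empty := by
        simp only [h]
    _ = (l.filter (fun row => !c row)).foldl (fun s row => PySem.Set.add s (k row)) PySem.Set.empty :=
        PySem.List.foldl_if_eq_foldl_filter _ _ _ _
    _ = PySem.Set.ofList ((l.filter (fun row => !c row)).map k) := by
        rw [← PySem.Set.update_map_eq_foldl_add,
          show (PySem.Set.empty : PySem.Set α) = ([] : List α) from rfl, PySem.Set.update_nil_left]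

-- the counting-dict loop's lookup is a count over the filtered, mapped list
theorem pv_winners_getD {β : Type} (l : List β) (c : β → Prop) [DecidablePred c] (k : β → String) (v : String) :
    (l.foldl (fun d row => if c row then d.insert (k row) (d.getD (k row) 0 + 1) else d)
        PySem.Dict.empty).getD v 0 = (((l.filter (fun row => decide (c row))).map k).count v : Int) := by
  rw [PySem.List.foldl_ite_eq_foldl_filter,
    ← List.foldl_map (f := k) (g := fun (d : PySem.Dict String Int) x => d.insert x (d.getD x 0 + 1)),
    PySem.Dict.getD_foldl_insert_add_one, PySem.Dict.getD_empty, Int.zero_add]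

-- Set.ofList is a sublist of its argument (first occurrences, in order)
theorem pv_ofList_sublist {α : Type} [BEq α] [LawfulBEq α] (l : List α) :
    (PySem.Set.ofList l : List α).Sublist l := by
  induction l with
  | nil => simp [PySem.Set.ofList_nil]
  | cons x xs ih =>
      rw [PySem.Set.ofList_cons]
      exact List.Sublist.cons₂ x ((List.filter_sublist).trans ih)

theorem pv_ofList_cons_of_not_mem {α : Type} [BEq α] [LawfulBEq α] (x : α) (l : List α)
    (h : x ∉ l) : PySem.Set.ofList (x :: l) = x :: PySem.Set.ofList l := by
  rw [PySem.Set.ofList_cons]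
  congr 1
  apply List.filter_eq_self.mpr
  intro y hy
  have : y ≠ x := by
    rintro rfl; exact h ((PySem.Set.mem_ofList l y).mp hy)
  simpa using this

theorem pv_ofList_cons_cons_self {α : Type} [BEq α] [LawfulBEq α] (x : α) (l : List α) :
    PySem.Set.ofList (x :: x :: l) = PySem.Set.ofList (x :: l) := by
  simp [PySem.Set.ofList_cons, PySem.Set.discard, List.filter_filter]

-- the group scan over a key-sorted pair list, with an open group (rid, won)
theorem pv_scan_eq (S : List (String × Bool)) (rid : String) (won : Bool)
    (hs : S.Pairwise (fun a b => a.1 ≤ b.1)) (hge : ∀ p ∈ S, rid ≤ p.1) :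
    pvScan (some (rid, won)) S
      = ((PySem.Set.ofList (rid :: S.map Prod.fst) : List String).filter
          (fun x => !(won && x == rid || decide ((x, true) ∈ S)))).map pvFmt := by
  induction S generalizing rid won with
  | nil =>
      cases won <;> simp [pvScan, PySem.Set.ofList_cons, PySem.Set.ofList_nil,
        PySem.Set.discard, pvFmt]
  | cons p rest ih =>
      obtain ⟨r, w⟩ := p
      rw [List.pairwise_cons] at hs
      by_cases hr : r = rid
      · subst hr
        have := ih r (won || w) hs.2 (fun p hp => hs.1 p hp)
        simp only [pvScan, BEq.rfl, if_true]
        rw [this, List.map_cons, pv_ofList_cons_cons_self]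
        congr 1
        apply List.filter_congr
        intro x _
        by_cases hx : x = r
        · subst hx
          by_cases hw : w <;> by_cases hwon : won <;>
            simp [hw, hwon, List.mem_cons, Prod.ext_iff]
        · have hx' : (x == r) = false := by simpa using hx
          simp [hx', List.mem_cons, Prod.ext_iff, hx]
      · have hlt : rid < r := lt_of_le_of_ne (hge (r, w) (List.mem_cons_self)) (Ne.symm hr)
        have hnm : rid ∉ (r :: rest.map Prod.fst) := by
          intro hmem
          rcases List.mem_cons.mp hmem with h | h
          · exact absurd h.symm (ne_of_gt hlt)
          · obtain ⟨q, hq, hq1⟩ := List.mem_map.mp h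
            have hle : r ≤ q.1 := hs.1 q hq
            exact absurd (hq1 ▸ hle) (not_le_of_gt hlt)
        have hr' : (r == rid) = false := by simpa using hr
        simp only [pvScan, hr', Bool.false_eq_true, if_false]
        rw [ih r w hs.2 (fun p hp => hs.1 p hp), List.map_cons,
          pv_ofList_cons_of_not_mem rid _ hnm]
        rw [List.filter_cons]
        have hnotinS : ((rid, true) ∈ (r, w) :: rest) = False := by
          simp only [eq_iff_iff, iff_false, List.mem_cons, Prod.ext_iff, not_or]
          constructor
          · rintro ⟨h1, _⟩; exact hr h1.symm
          · intro hmem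
            have : r ≤ rid := by
              have := hs.1 (rid, true) hmem; simpa using this
            exact absurd this (not_le_of_gt hlt)
        have hpred : (!(won && rid == rid || decide ((rid, true) ∈ (r, w) :: rest))) = !won := by
          simp [hnotinS]
        rw [hpred]
        have hcong : List.filter (fun x => !(won && x == rid || decide ((x, true) ∈ (r, w) :: rest)))
              (PySem.Set.ofList (r :: rest.map Prod.fst) : List String)
            = List.filter (fun x => !(w && x == r || decide ((x, true) ∈ rest)))
              (PySem.Set.ofList (r :: rest.map Prod.fst) : List String) := by
          apply List.filter_congr
          intro x hx
          have hxmem : x ∈ r :: rest.map Prod.fst := (PySem.Set.mem_ofList _ x).mp hx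
          have hxne : x ≠ rid := by
            rcases List.mem_cons.mp hxmem with h | h
            · subst h; exact Ne.symm (ne_of_lt hlt)
            · obtain ⟨q, hq, hq1⟩ := List.mem_map.mp h
              have : r ≤ q.1 := hs.1 q hq
              subst hq1
              exact fun hE => absurd (hE ▸ this) (not_le_of_gt hlt)
          have hxne' : (x == rid) = false := by simpa using hxne
          by_cases hxr : x = r
          · subst hxr
            by_cases hw : w <;> simp [hxne', hw, List.mem_cons, Prod.ext_iff]
          · have hxr' : (x == r) = false := by simpa using hxr
            simp [hxne', hxr', List.mem_cons, Prod.ext_iff, hxr]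
        rw [hcong]
        cases won <;> simp [pvFmt]

-- the whole of port B, as a filter of the deduplicated sorted key list
theorem pv_alt_closed (Q : List (String × Bool)) :
    pvScan none (PySem.List.sorted Q (fun p => p.1) false)
      = ((PySem.Set.ofList ((PySem.List.sorted Q (fun p => p.1) false).map Prod.fst) : List String).filter
          (fun x => !decide ((x, true) ∈ PySem.List.sorted Q (fun p => p.1) false))).map pvFmt := by
  have hs := PySem.List.sorted_pairwise Q (fun p => p.1)
  cases hS : PySem.List.sorted Q (fun p => p.1) false with
  | nil => simp [pvScan, PySem.Set.ofList_nil]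
  | cons p rest =>
      obtain ⟨r, w⟩ := p
      rw [hS] at hs
      rw [List.pairwise_cons] at hs
      show pvScan (some (r, w)) rest = _
      rw [pv_scan_eq rest r w hs.2 (fun q hq => hs.1 q hq), List.map_cons]
      congr 1
      apply List.filter_congr
      intro x _
      by_cases hxr : x = r
      · subst hxr
        by_cases hw : w <;> simp [hw, List.mem_cons, Prod.ext_iff]
      · have hxr' : (x == r) = false := by simpa using hxr
        simp [hxr', List.mem_cons, Prod.ext_iff, hxr]

-- the whole pipeline, abstracted over the blank test, the key and the winner flag
theorem pv_main {β : Type} (l : List β) (cB : β → Bool) (k : β → String) (fl : β → Bool)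
    (cW : β → Prop) [DecidablePred cW]
    (hcB : ∀ row, cB row = (k row == "" || k row == "NULL" || k row == "nan" || k row == "NaN"))
    (hcW : ∀ row, cW row ↔ (k row ≠ "" ∧ fl row = true)) :
    ((PySem.List.sorted
        (l.foldl (fun s row => if cB row then s else PySem.Set.add s (k row)) PySem.Set.empty)
        (fun x => x) false).filter
      (fun rid => decide
        ((l.foldl (fun (d : PySem.Dict String Int) row =>
            if cW row then d.insert (k row) (d.getD (k row) 0 + 1) else d)
            PySem.Dict.empty).getD rid 0 < 1))).map
      (fun rid => "results: race_id=" ++ rid ++ " winner_count=0")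
    = pvScan none (PySem.List.sorted
        (l.foldl (fun acc row => if cB row then acc else acc ++ [(k row, fl row)]) [])
        (fun p => p.1) false) := by
  -- name the filtered row list and the pair list
  have hpairs : l.foldl (fun acc row => if cB row then acc else acc ++ [(k row, fl row)]) []
      = (l.filter (fun row => !cB row)).map (fun row => (k row, fl row)) := by
    have h : ∀ (acc : List (String × Bool)) row,
        (if cB row then acc else acc ++ [(k row, fl row)])
          = (if !cB row then acc ++ [(k row, fl row)] else acc) := by
      intro acc row; cases hc : cB row <;> simp
    calc l.foldl (fun acc row => if cB row then acc else acc ++ [(k row, fl row)]) []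
        = l.foldl (fun acc row => if !cB row then acc ++ [(k row, fl row)] else acc) [] := by
          simp only [h]
      _ = _ := by
          rw [PySem.List.foldl_append_if (fun row => !cB row) (fun row => (k row, fl row)) l []]
          simp
  rw [hpairs, pv_foldl_skip_add l cB k, pv_alt_closed]
  set Rf := l.filter (fun row => !cB row) with hRf
  set Q := Rf.map (fun row => (k row, fl row)) with hQ
  set S := PySem.List.sorted Q (fun p => p.1) false with hS
  have hQfst : Q.map Prod.fst = Rf.map k := by
    rw [hQ, List.map_map]; rfl
  have hperm : (S.map Prod.fst).Perm (Rf.map k) := by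
    rw [← hQfst]; exact (PySem.List.sorted_perm Q (fun p => p.1) false).map _
  -- the two sorted key lists coincide
  have hofperm : (PySem.Set.ofList (Rf.map k) : List String).Perm
      (PySem.Set.ofList (S.map Prod.fst) : List String) := by
    apply (List.perm_ext_iff_of_nodup (PySem.Set.nodup_ofList _) (PySem.Set.nodup_ofList _)).mpr
    intro a
    rw [PySem.Set.mem_ofList, PySem.Set.mem_ofList, hperm.mem_iff]
  have hSfst_pw : (S.map Prod.fst).Pairwise (· ≤ ·) := by
    have := PySem.List.sorted_pairwise Q (fun p => p.1)
    rw [← hS] at this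
    exact List.Pairwise.map _ (fun a b h => h) this
  have hlist : PySem.List.sorted (PySem.Set.ofList (Rf.map k)) (fun x => x) false
      = (PySem.Set.ofList (S.map Prod.fst) : List String) := by
    calc PySem.List.sorted (PySem.Set.ofList (Rf.map k)) (fun x => x) false
        = PySem.List.sorted (PySem.Set.ofList (S.map Prod.fst)) (fun x => x) false :=
          (PySem.List.sorted_id_eq_sorted_id_iff_perm _ _).mpr hofperm
      _ = _ := PySem.List.sorted_eq_self_of_pairwise _ _
          (List.Pairwise.sublist (pv_ofList_sublist _) hSfst_pw)
  rw [hlist]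
  -- same list on both sides: compare the two filter predicates on its members
  congr 1
  apply List.filter_congr
  intro rid hrid
  have hridRf : rid ∈ Rf.map k := by
    have := (PySem.Set.mem_ofList _ rid).mp hrid
    exact hperm.mem_iff.mp this
  obtain ⟨row0, hrow0, hkrow0⟩ := List.mem_map.mp hridRf
  have hrow0f : cB row0 = false := by
    have := List.of_mem_filter (hRf ▸ hrow0)
    simpa using this
  have hridnb : rid ≠ "" ∧ rid ≠ "NULL" ∧ rid ≠ "nan" ∧ rid ≠ "NaN" := by
    rw [hcB row0, hkrow0] at hrow0f
    simp only [Bool.or_eq_false_iff, beq_eq_false_iff_ne, ne_eq] at hrow0f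
    exact ⟨hrow0f.1.1.1, hrow0f.1.1.2, hrow0f.1.2, hrow0f.2⟩
  rw [pv_winners_getD l cW k rid]
  -- membership forms of the two predicates
  have hmemS : (rid, true) ∈ S ↔ (rid, true) ∈ Q :=
    (hS ▸ PySem.List.sorted_perm Q (fun p => p.1) false).mem_iff
  have hiff : rid ∈ (l.filter (fun row => decide (cW row))).map k ↔ (rid, true) ∈ Q := by
    constructor
    · intro h
      obtain ⟨row, hrow, hkrow⟩ := List.mem_map.mp h
      have hcWrow : cW row := by simpa using List.of_mem_filter hrow
      have hfl : fl row = true := ((hcW row).mp hcWrow).2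
      have hcBrow : cB row = false := by
        rw [hcB row, hkrow]
        simp only [Bool.or_eq_false_iff, beq_eq_false_iff_ne, ne_eq]
        exact ⟨⟨⟨hridnb.1, hridnb.2.1⟩, hridnb.2.2.1⟩, hridnb.2.2.2⟩
      have hrowRf : row ∈ Rf := by
        rw [hRf]
        exact List.mem_filter.mpr ⟨List.mem_of_mem_filter hrow, by simp [hcBrow]⟩
      rw [hQ]
      exact List.mem_map.mpr ⟨row, hrowRf, by rw [hkrow, hfl]⟩
    · intro h
      obtain ⟨row, hrow, hpair⟩ := List.mem_map.mp (hQ ▸ h)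
      have hk : k row = rid := congrArg Prod.fst hpair
      have hfl : fl row = true := congrArg Prod.snd hpair
      have hcWrow : cW row := (hcW row).mpr ⟨by rw [hk]; exact hridnb.1, hfl⟩
      exact List.mem_map.mpr ⟨row, List.mem_filter.mpr
        ⟨List.mem_of_mem_filter (hRf ▸ hrow), by simpa using hcWrow⟩, hk⟩
  by_cases hmem : (rid, true) ∈ Q
  · have h1 : rid ∈ (l.filter (fun row => decide (cW row))).map k := hiff.mpr hmem
    have h2 : 0 < ((l.filter (fun row => decide (cW row))).map k).count rid :=
      List.count_pos_iff.mpr h1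
    have := hmemS.mpr hmem
    simp only [this, decide_true, Bool.not_true, decide_eq_false_iff_not, not_lt]
    omega
  · have h1 : rid ∉ (l.filter (fun row => decide (cW row))).map k := fun h => hmem (hiff.mp h)
    have h2 : ((l.filter (fun row => decide (cW row))).map k).count rid = 0 :=
      List.count_eq_zero.mpr h1
    have h3 : (rid, true) ∉ S := fun h => hmem (hmemS.mp h)
    simp [h2, h3]

-- ===== VERDICT (by name: the statement is the Claim_ definition above) =====
theorem check_winners_spec : Claim_equal_check_winners := by
  intro results _
  unfold Spec_check_winners check_winners check_winners_alt
  dsimp only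
  exact (pv_main results
    (fun row => blank ((PySem.Dict.mk row).getD "race_id" ""))
    (fun row => PySem.Str.strip ((PySem.Dict.mk row).getD "race_id" ""))
    (fun row => PySem.List.slice (PySem.Str.split₀ (PySem.Str.upper (PySem.Str.strip
      ((PySem.Dict.mk row).getD "finish_position" "")))) (some 0) (some 1) == ["1"])
    (fun row =>
      PySem.Str.strip ((PySem.Dict.mk row).getD "race_id" "") ≠ "" ∧
        PySem.List.slice (PySem.Str.split₀ (PySem.Str.upper (PySem.Str.strip
          ((PySem.Dict.mk row).getD "finish_position" "")))) (some 0) (some 1) = ["1"])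
    (fun _ => rfl)
    (fun row => by simp [beq_iff_eq]))
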